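-- pv_equiv track=rewrite | github.com/munkhdorj-m/Python-exercise-6-2-Loop-3 | assignment.py | sum_even_or_odd
-- ===== SOURCE A (Python) =====
-- def sum_even_or_odd(num):
--     num = abs(num)
--     total = 0
--
--     while num > 0:
--         digit = num % 10
--         total += digit
--         num //= 10
--
--     if total % 2 == 0:
--         return "Even"
--     else:
--         return "Odd"
-- ===== SOURCE B (Python) =====
-- def sum_even_or_odd(num):
--     s = str(abs(num))
--     total = sum(int(c) for c in s)
--     return "Even" if total % 2 == 0 else "Odd"
-- ===== Notes on version B (the rewrite author's own statement) =====
-- stated objective: idiomatic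
-- what changed: B sums the digits of the decimal string representation str(abs(num)), traversing them high-to-low as characters, instead of extracting them arithmetically low-to-high with modulus and floor division in a while loop.
import Mathlib
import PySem

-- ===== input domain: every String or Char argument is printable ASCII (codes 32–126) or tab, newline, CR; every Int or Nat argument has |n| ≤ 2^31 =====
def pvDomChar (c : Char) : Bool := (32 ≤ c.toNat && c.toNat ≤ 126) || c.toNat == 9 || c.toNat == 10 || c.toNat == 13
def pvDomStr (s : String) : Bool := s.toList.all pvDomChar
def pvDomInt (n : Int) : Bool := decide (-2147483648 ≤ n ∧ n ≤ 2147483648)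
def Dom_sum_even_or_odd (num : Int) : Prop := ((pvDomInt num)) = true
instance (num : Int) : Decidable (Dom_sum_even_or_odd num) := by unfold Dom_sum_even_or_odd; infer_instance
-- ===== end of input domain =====

-- B sums the digits of the decimal string representation str(abs(num)) instead of
-- extracting digits arithmetically with modulus and floor division in a while loop (idiomatic, same cost).


-- ===== PORT A =====
-- the while loop: while num > 0: digit = num % 10; total += digit; num //= 10
theorem pvALoop_dec (num : Int) (h : 0 < num) :
    (PySem.Int.floordiv num 10).toNat < num.toNat := by
  simp only [PySem.Int.floordiv]
  rw [Int.fdiv_eq_ediv]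
  omega

def pvALoop (num total : Int) : Int :=
  if h : 0 < num then
    pvALoop (PySem.Int.floordiv num 10) (total + PySem.Int.mod num 10)
  else total
termination_by num.toNat
decreasing_by exact pvALoop_dec num h

def sum_even_or_odd (num : Int) : String :=
  let num := |num|
  let total := pvALoop num 0
  if PySem.Int.mod total 2 == 0 then "Even" else "Odd"

-- ===== PORT B =====
-- s = str(abs(num)); total = sum(int(c) for c in s)
def sum_even_or_odd_alt (num : Int) : String :=
  let s := PySem.Int.toStr |num|
  let total := s.toList.foldl (fun acc c => acc + (PySem.Int.ofStr? (String.singleton c)).getD 0) 0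
  if PySem.Int.mod total 2 == 0 then "Even" else "Odd"

-- ===== PRECONDITION & SPEC =====
def Spec_sum_even_or_odd (num : Int) (out : String) : Prop := out = sum_even_or_odd_alt num
instance (num : Int) (out : String) : Decidable (Spec_sum_even_or_odd num out) := by unfold Spec_sum_even_or_odd; infer_instance

-- ===== CLAIM (what is proved, stated in full; the proofs are below) =====
def Claim_equal_sum_even_or_odd : Prop := ∀ (num : Int), Dom_sum_even_or_odd num → Spec_sum_even_or_odd num (sum_even_or_odd num)

-- ===== LEMMAS AND PROOFS =====

-- the common digit-sum specification (on naturals, low-to-high)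
def pvDsum (n : Nat) : Int :=
  if n = 0 then 0 else (n % 10 : Nat) + pvDsum (n / 10)
decreasing_by exact Nat.div_lt_self (by omega) (by norm_num)

-- the value int(c) assigns to a decimal digit character
def pvVal (c : Char) : Int := (PySem.Int.ofStr? (String.singleton c)).getD 0

theorem pvVal_digitChar (d : Nat) (hd : d < 10) : pvVal (Nat.digitChar d) = (d : Int) := by
  interval_cases d <;> decide

theorem pvALoop_eq (k : Nat) : ∀ (n t : Int), n.toNat ≤ k → 0 ≤ n →
    pvALoop n t = t + pvDsum n.toNat := by
  induction k with
  | zero =>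
    intro n t hk hn
    rw [pvALoop]
    have h0 : n = 0 := by omega
    simp [h0, pvDsum]
  | succ k ih =>
    intro n t hk hn
    rw [pvALoop]
    by_cases h : 0 < n
    · rw [dif_pos h]
      have hdec := pvALoop_dec n h
      have hfd : PySem.Int.floordiv n 10 = ((n.toNat / 10 : Nat) : Int) := by
        simp only [PySem.Int.floordiv]; rw [Int.fdiv_eq_ediv]; omega
      have hmd : PySem.Int.mod n 10 = ((n.toNat % 10 : Nat) : Int) := by
        simp only [PySem.Int.mod]; rw [Int.fmod_eq_emod]; simp; omega
      rw [ih (PySem.Int.floordiv n 10) (t + PySem.Int.mod n 10) (by omega)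
            (by rw [hfd]; positivity)]
      rw [hfd, hmd]
      conv_rhs => rw [pvDsum]
      have hn0 : n.toNat ≠ 0 := by omega
      simp only [hn0, if_false, Int.toNat_natCast]
      ring
    · rw [dif_neg h]
      have h0 : n = 0 := by omega
      simp [h0, pvDsum]

theorem pvToDigitsCore_sum (f : Nat) : ∀ (n : Nat) (ds : List Char), n < f →
    ((Nat.toDigitsCore 10 f n ds).map pvVal).sum = pvDsum n + ((ds.map pvVal).sum) := by
  induction f with
  | zero => intro n ds h; omega
  | succ f ih =>
    intro n ds h
    rw [Nat.toDigitsCore]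
    by_cases h10 : n / 10 = 0
    · simp only [h10, if_true, List.map_cons, List.sum_cons]
      rw [pvVal_digitChar _ (Nat.mod_lt n (by norm_num))]
      rw [pvDsum]
      by_cases hn : n = 0
      · simp [hn, pvDsum]
      · simp [hn, h10, pvDsum]
    · simp only [h10, if_false]
      have hlt : n / 10 < f := by
        have : n / 10 < n := Nat.div_lt_self (by omega) (by norm_num)
        omega
      rw [ih _ _ hlt]
      simp only [List.map_cons, List.sum_cons]
      rw [pvVal_digitChar _ (Nat.mod_lt n (by omega))]
      conv_rhs => rw [pvDsum]
      have hn0 : n ≠ 0 := by omega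
      simp only [hn0, if_false]
      ring

theorem pvFoldl_val (l : List Char) : ∀ (a : Int),
    l.foldl (fun acc c => acc + (PySem.Int.ofStr? (String.singleton c)).getD 0) a
      = a + (l.map pvVal).sum := by
  induction l with
  | nil => intro a; simp
  | cons c l ih =>
    intro a
    simp only [List.foldl_cons, List.map_cons, List.sum_cons, ih]
    show a + pvVal c + _ = _
    ring

theorem pvTotals_eq (num : Int) :
    pvALoop |num| 0 =
    (PySem.Int.toStr |num|).toList.foldl
      (fun acc c => acc + (PySem.Int.ofStr? (String.singleton c)).getD 0) 0 := by
  have habs : (0:Int) ≤ |num| := abs_nonneg num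
  rw [pvALoop_eq |num|.toNat _ _ (le_refl _) habs]
  rw [PySem.Int.toList_toStr]
  have hnn : ¬ (|num| < 0) := by omega
  simp only [PySem.Int.toChars, hnn, if_false]
  rw [pvFoldl_val]
  rw [Nat.toDigits, pvToDigitsCore_sum (|num|.toNat + 1) |num|.toNat [] (by omega)]
  simp

-- ===== VERDICT (by name: the statement is the Claim_ definition above) =====
theorem sum_even_or_odd_spec : Claim_equal_sum_even_or_odd := by
  intro num _
  unfold Spec_sum_even_or_odd sum_even_or_odd sum_even_or_odd_alt
  simp only [pvTotals_eq num]
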